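-- pv_equiv track=rewrite | github.com/brew-guy/advent-of-code | 2022/test.py | stringOverlap
-- ===== SOURCE A (Python) =====
-- def stringOverlap(str1, str2, second_pass=False):
--     merged = []
--     for i in range(1, len(str1)):
--         piece = str1[-i:]
--         if str2.startswith(piece):
--             merged.append(str1[:-i] + str2)
--
--     if str2.find(str1) > -1:
--         merged.append(str2)
--
--     if not merged:
--         merged.append(str1 + str2)
--
--     if not second_pass:
--         merged += stringOverlap(str2, str1, True)
--
--     return merged
-- ===== SOURCE B (Python) =====
-- def _overlaps(s, t):
--     # all merges of s followed by t: grow the tested suffix of s one char at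
--     # a time instead of re-slicing it for every length
--     out = []
--     suffix = ""
--     for c in reversed(s[1:]):
--         suffix = c + suffix
--         if t.startswith(suffix):
--             out.append(s[:-len(suffix)] + t)
--     if s in t:
--         out.append(t)
--     if not out:
--         out.append(s + t)
--     return out
--
--
-- def stringOverlap(str1, str2, second_pass=False):
--     if second_pass:
--         return _overlaps(str1, str2)
--     return _overlaps(str1, str2) + _overlaps(str2, str1)
-- ===== Notes on version B (the rewrite author's own statement) =====
-- stated objective: alternative
-- what changed: B replaces A's flagged self-recursion and per-length negative-index re-slicing by a symmetric helper called once per direction whose loop walks the reversed tail of the string, growing the candidate suffix incrementally by prepending one character per step.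
import Mathlib
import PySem

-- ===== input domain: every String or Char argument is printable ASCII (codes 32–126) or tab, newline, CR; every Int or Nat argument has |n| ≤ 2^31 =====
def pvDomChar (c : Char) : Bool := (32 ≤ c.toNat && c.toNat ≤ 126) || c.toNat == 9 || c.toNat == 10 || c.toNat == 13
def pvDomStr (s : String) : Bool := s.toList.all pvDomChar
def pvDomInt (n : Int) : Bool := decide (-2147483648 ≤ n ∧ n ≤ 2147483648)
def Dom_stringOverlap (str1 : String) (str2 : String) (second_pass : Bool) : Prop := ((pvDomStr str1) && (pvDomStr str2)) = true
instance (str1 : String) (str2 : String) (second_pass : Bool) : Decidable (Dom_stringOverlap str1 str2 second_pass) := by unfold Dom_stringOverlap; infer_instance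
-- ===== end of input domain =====

-- B replaces A's flagged self-recursion and per-length re-slicing by a symmetric helper
-- called once per direction, growing the candidate suffix one prepended char per step (alternative, same cost).


-- ===== PORT A =====
-- literal transliteration of A over the code-point lists (PySem.Chars ops), recursion on the flag kept
def stringOverlap (str1 : String) (str2 : String) (second_pass : Bool) : List String :=
  let s := str1.toList
  let t := str2.toList
  let merged : List String :=
    (PySem.List.pyRange 1 (PySem.Chars.len s) 1).foldl
      (fun merged i =>
        if PySem.Chars.startswith t (PySem.Chars.slice s (some (-i)) none) then
          merged ++ [String.ofList (PySem.Chars.slice s none (some (-i)) ++ t)]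
        else merged) []
  let merged := if PySem.Chars.find t s > -1 then merged ++ [str2] else merged
  let merged := if merged = [] then merged ++ [String.ofList (s ++ t)] else merged
  match second_pass with
  | true => merged
  | false => merged ++ stringOverlap str2 str1 true
termination_by (if second_pass then 0 else 1)

-- ===== PORT B =====
-- B's helper _overlaps: fold over reversed(s[1:]) growing the suffix by prepending
def overlapsAlt (s t : List Char) : List String :=
  let res :=
    ((PySem.Chars.slice s (some 1) none).reverse).foldl
      (fun (st : List Char × List String) c =>
        let suffix := c :: st.1
        if PySem.Chars.startswith t suffix then
          (suffix, st.2 ++ [String.ofList (PySem.Chars.slice s none (some (-(suffix.length : Int))) ++ t)])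
        else (suffix, st.2)) ([], [])
  let out := res.2
  let out := if PySem.Chars.isIn s t then out ++ [String.ofList t] else out
  if out = [] then out ++ [String.ofList (s ++ t)] else out

def stringOverlap_alt (str1 : String) (str2 : String) (second_pass : Bool) : List String :=
  if second_pass then overlapsAlt str1.toList str2.toList
  else overlapsAlt str1.toList str2.toList ++ overlapsAlt str2.toList str1.toList

-- ===== PRECONDITION & SPEC =====
def Spec_stringOverlap (str1 : String) (str2 : String) (second_pass : Bool) (out : List String) : Prop := out = stringOverlap_alt str1 str2 second_pass
instance (str1 : String) (str2 : String) (second_pass : Bool) (out : List String) : Decidable (Spec_stringOverlap str1 str2 second_pass out) := by unfold Spec_stringOverlap; infer_instance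

-- ===== CLAIM (what is proved, stated in full; the proofs are below) =====
def Claim_equal_stringOverlap : Prop := ∀ (str1 : String) (str2 : String) (second_pass : Bool), Dom_stringOverlap str1 str2 second_pass → Spec_stringOverlap str1 str2 second_pass (stringOverlap str1 str2 second_pass)

-- ===== LEMMAS AND PROOFS =====

-- common normal form of the overlap-collecting loop
def ovItems (s t : List Char) : List String :=
  (List.range (s.length - 1)).filterMap (fun k =>
    if PySem.Chars.startswith t (s.drop (s.length - 1 - k)) then
      some (String.ofList (s.take (s.length - 1 - k) ++ t))
    else none)

theorem filter_map_eq_filterMap {α β : Type} (p : α → Bool) (f : α → β) (l : List α) :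
    (l.filter p).map f = l.filterMap (fun x => if p x then some (f x) else none) := by
  induction l with
  | nil => rfl
  | cons a l ih => by_cases h : p a <;> simp [h, ih]

theorem aloop_eq_ovItems (s t : List Char) :
    ((PySem.List.pyRange 1 (PySem.Chars.len s) 1).foldl
      (fun merged i =>
        if PySem.Chars.startswith t (PySem.Chars.slice s (some (-i)) none) then
          merged ++ [String.ofList (PySem.Chars.slice s none (some (-i)) ++ t)]
        else merged) []) = ovItems s t := by
  rw [PySem.List.foldl_append_if, filter_map_eq_filterMap]
  rw [PySem.Chars.len_eq, PySem.List.pyRange_one]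
  rw [List.filterMap_map]
  have hlen : ((s.length : Int) - 1).toNat = s.length - 1 := by omega
  rw [hlen, ovItems]
  apply List.filterMap_congr
  intro k hk
  simp only [List.mem_range] at hk
  have h1 : (1 : Int) + k = ((k + 1 : Nat) : Int) := by push_cast; ring
  have h2 : PySem.List.slice s (some (-((k + 1 : Nat) : Int))) none = s.drop (s.length - (k + 1)) :=
    PySem.List.slice_from_neg_natCast s (k + 1) (by omega)
  have h3 : PySem.List.slice s none (some (-((k + 1 : Nat) : Int))) = s.take (s.length - (k + 1)) :=
    PySem.List.slice_to_neg_natCast s (k + 1) (by omega)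
  have h4 : s.length - (k + 1) = s.length - 1 - k := by omega
  simp only [Function.comp, h1, PySem.Chars.slice_eq_listSlice, h2, h3, h4]

-- B's fold, generalised: the first component accumulates the reversed prefix,
-- the second appends one item per matching grown suffix
theorem bfold_general (t : List Char) (g : List Char → String) (l : List Char)
    (a : List Char) (o : List String) :
    (l.foldl
      (fun (st : List Char × List String) c =>
        let suffix := c :: st.1
        if PySem.Chars.startswith t suffix then
          (suffix, st.2 ++ [g suffix])
        else (suffix, st.2)) (a, o))
    = (l.reverse ++ a,
       o ++ (List.range l.length).filterMap (fun k =>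
         let suf := (l.take (k + 1)).reverse ++ a
         if PySem.Chars.startswith t suf then some (g suf) else none)) := by
  induction l generalizing a o with
  | nil => simp
  | cons c l ih =>
    simp only [List.foldl_cons]
    rw [show (List.range (c :: l).length) = 0 :: (List.range l.length).map (· + 1) by
      simp [List.range_succ_eq_map]]
    by_cases h : PySem.Chars.startswith t (c :: a)
    · simp only [h, if_pos, ih]
      simp only [List.filterMap_cons, List.filterMap_map]
      simp only [List.take, List.reverse_cons, List.reverse_nil, List.nil_append,
        List.cons_append, h, if_pos, Prod.mk.injEq]
      refine ⟨by simp, ?_⟩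
      rw [List.append_assoc, List.singleton_append]
      congr 2
      apply List.filterMap_congr
      intro k hk
      simp [Function.comp, List.append_assoc]
    · simp only [h, if_neg, ih, Bool.false_eq_true, not_false_iff]
      simp only [List.filterMap_cons, List.filterMap_map]
      simp only [List.take, List.reverse_cons, List.reverse_nil, List.nil_append,
        List.cons_append, h, Prod.mk.injEq]
      refine ⟨by simp, ?_⟩
      congr 1
      apply List.filterMap_congr
      intro k hk
      simp [Function.comp, List.append_assoc]

theorem bloop_eq_ovItems (s t : List Char) :
    (((PySem.Chars.slice s (some 1) none).reverse).foldl
      (fun (st : List Char × List String) c =>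
        let suffix := c :: st.1
        if PySem.Chars.startswith t suffix then
          (suffix, st.2 ++ [String.ofList (PySem.Chars.slice s none (some (-(suffix.length : Int))) ++ t)])
        else (suffix, st.2)) ([], [])).2 = ovItems s t := by
  rw [bfold_general t (fun suffix => String.ofList (PySem.Chars.slice s none (some (-(suffix.length : Int))) ++ t))]
  simp only [List.nil_append, ovItems]
  have hsl : PySem.Chars.slice s (some 1) none = s.tail := by
    simp [PySem.List.slice_from_one]
  rw [hsl, List.length_reverse, List.length_tail]
  apply List.filterMap_congr
  intro k hk
  simp only [List.mem_range] at hk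
  have htk : (s.tail.reverse.take (k + 1)).reverse = s.drop (s.length - 1 - k) := by
    rw [List.take_reverse, List.reverse_reverse]
    rw [List.drop_tail]
    congr 1
    have := s.length_tail
    omega
  have hlen2 : (s.drop (s.length - 1 - k)).length = k + 1 := by
    rw [List.length_drop]; omega
  simp only [List.append_nil, htk, hlen2]
  have h3 : PySem.List.slice s none (some (-((k + 1 : Nat) : Int))) = s.take (s.length - (k + 1)) :=
    PySem.List.slice_to_neg_natCast s (k + 1) (by omega)
  have h4 : s.length - (k + 1) = s.length - 1 - k := by omega
  simp only [PySem.Chars.slice_eq_listSlice, h3, h4]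

theorem find_gt_iff_isIn (s t : List Char) :
    (PySem.Chars.find t s > -1) ↔ PySem.Chars.isIn s t = true := by
  rw [PySem.Chars.isIn_iff_infix, ← PySem.Chars.find_nonneg_iff]
  omega

theorem stringOverlap_true_eq (str1 str2 : String) :
    stringOverlap str1 str2 true = overlapsAlt str1.toList str2.toList := by
  rw [stringOverlap, overlapsAlt]
  simp only [aloop_eq_ovItems, bloop_eq_ovItems, find_gt_iff_isIn]
  simp only [String.ofList_toList]

-- ===== VERDICT (by name: the statement is the Claim_ definition above) =====
theorem stringOverlap_spec : Claim_equal_stringOverlap := by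
  intro str1 str2 second_pass _
  unfold Spec_stringOverlap stringOverlap_alt
  cases second_pass with
  | true => simp only [if_pos, stringOverlap_true_eq]
  | false =>
    rw [stringOverlap]
    simp only [Bool.false_eq_true, if_false, stringOverlap_true_eq]
    congr 1
    have := stringOverlap_true_eq str1 str2
    rw [stringOverlap] at this
    simpa using this
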